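-- pv_equiv track=rewrite | github.com/logflux/logflux | src/logflux/iplom.py | groupby_col
-- ===== SOURCE A (Python) =====
-- def groupby_col(tok_logs):
--     #logs with the same length
--     loglen = len(tok_logs[0])
--     col_stats = [{} for i in range(loglen)]
--
--     for i, tok_log in enumerate(tok_logs):
--         for j, tok in enumerate(tok_log):
--             if tok not in col_stats[j]:
--                 col_stats[j][tok] = []
--             col_stats[j][tok].append(i)
--
--     return col_stats
-- ===== SOURCE B (Python) =====
-- def groupby_col(tok_logs):
--     # dedup + filter per column: no dict mutation; distinct tokens first, then each
--     # token's index list built by filtering the column.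
--     loglen = len(tok_logs[0])
--     cols = []
--     for j in range(loglen):
--         column = [(i, row[j]) for i, row in enumerate(tok_logs) if j < len(row)]
--         order = list(dict.fromkeys(t for _, t in column))
--         cols.append({t: [i for i, u in column if u == t] for t in order})
--     return cols
-- ===== Notes on version B (the rewrite author's own statement) =====
-- stated objective: alternative
-- what changed: B replaces A's single mutating pass over rows (appending into per-column dicts in place) with a dedup+filter algorithm: per column it first computes the distinct tokens in first-occurrence order via dict.fromkeys, then builds each token's index list by filtering the column, so no dict is ever updated incrementally.
import Mathlib
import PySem

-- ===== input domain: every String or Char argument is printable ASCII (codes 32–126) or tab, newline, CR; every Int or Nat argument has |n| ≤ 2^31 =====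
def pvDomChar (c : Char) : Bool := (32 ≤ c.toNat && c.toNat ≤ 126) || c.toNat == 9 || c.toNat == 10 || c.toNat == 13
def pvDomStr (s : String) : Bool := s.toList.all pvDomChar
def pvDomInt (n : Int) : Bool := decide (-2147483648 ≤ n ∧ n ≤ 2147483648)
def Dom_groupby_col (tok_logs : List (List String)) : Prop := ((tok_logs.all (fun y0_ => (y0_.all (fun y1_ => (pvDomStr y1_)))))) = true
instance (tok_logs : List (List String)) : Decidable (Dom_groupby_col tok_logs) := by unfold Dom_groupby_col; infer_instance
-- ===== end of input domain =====

-- B replaces A's mutating row pass over per-column dicts with a per-column dedup+filter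
-- algorithm (distinct tokens first, then each token's indices by filtering); same return value on Pre_.

-- ===== PORT A =====
-- 'if tok not in col_stats[j]: col_stats[j][tok] = []' then 'col_stats[j][tok].append(i)'
def pvColUpdA (i : Int) (d : PySem.Dict String (List Int)) (tok : String) : PySem.Dict String (List Int) :=
  let d1 := if d.contains tok then d else d.insert tok ([] : List Int)
  d1.modify tok [] (· ++ [i])

def groupby_col (tok_logs : List (List String)) : List (List (String × List Int)) :=
  let loglen := (tok_logs.headD []).length            -- len(tok_logs[0]); raises in Python on [] (outside Pre_)
  let init : List (PySem.Dict String (List Int)) := (List.range loglen).map (fun _ => PySem.Dict.empty)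
  let final := (PySem.List.enumerate tok_logs).foldl
    (fun cs p =>
      (PySem.List.enumerate p.2).foldl
        (fun cs q => PySem.List.pySetD cs q.1 (pvColUpdA p.1 (PySem.List.pyGetD cs q.1 PySem.Dict.empty) q.2)) cs)
    init
  final.map (·.items)

-- ===== PORT B =====
def groupby_col_alt (tok_logs : List (List String)) : List (List (String × List Int)) :=
  let loglen := (tok_logs.headD []).length            -- len(tok_logs[0]); raises in Python on [] (outside Pre_)
  (PySem.List.pyRange 0 loglen 1).foldl
    (fun cols j =>
      -- column = [(i, row[j]) for i, row in enumerate(tok_logs) if j < len(row)]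
      let column := (PySem.List.enumerate tok_logs).filterMap
        (fun p => if j < (p.2.length : Int) then some (p.1, PySem.List.pyGetD p.2 j "") else none)
      -- order = list(dict.fromkeys(t for _, t in column))
      let order := PySem.List.dedup (column.map (·.2))
      -- {t: [i for i, u in column if u == t] for t in order}
      cols ++ [(order.foldl
        (fun d t => d.insert t ((column.filter (fun q => q.2 == t)).map (·.1)))
        (PySem.Dict.empty : PySem.Dict String (List Int))).items])
    []

-- ===== PRECONDITION & SPEC =====
-- Pre_ excludes exactly the inputs on which Python A raises IndexError: empty tok_logs
-- (tok_logs[0]) and inputs where some log is longer than the first (col_stats[j] out of range).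
def Pre_groupby_col (tok_logs : List (List String)) : Prop :=
  tok_logs ≠ [] ∧ ∀ row ∈ tok_logs, row.length ≤ (tok_logs.headD []).length
instance (tok_logs : List (List String)) : Decidable (Pre_groupby_col tok_logs) := by
  unfold Pre_groupby_col; infer_instance

def pvWitness_groupby_col : List (List String) := [["a", "b"], ["a", "c"], ["x"]]

def Spec_groupby_col (tok_logs : List (List String)) (out : List (List (String × List Int))) : Prop :=
  out = groupby_col_alt tok_logs
instance (tok_logs : List (List String)) (out : List (List (String × List Int))) : Decidable (Spec_groupby_col tok_logs out) := by
  unfold Spec_groupby_col; infer_instance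

-- ===== CLAIM =====
def Claim_equal_groupby_col : Prop := ∀ (tok_logs : List (List String)), Dom_groupby_col tok_logs → Pre_groupby_col tok_logs → Spec_groupby_col tok_logs (groupby_col tok_logs)

-- ===== LEMMAS AND PROOFS =====

-- one step on an Option-valued column entry: apply the token at column k of a row, if any
def pvG (ot : Option String) (i : Int) (od : Option (PySem.Dict String (List Int))) :
    Option (PySem.Dict String (List Int)) :=
  match ot with
  | some t => od.map (fun d => pvColUpdA i d t)
  | none => od

-- per-column step over one (index, row) pair
def pvColStep (k : Nat) (d : PySem.Dict String (List Int)) (p : Int × List String) :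
    PySem.Dict String (List Int) :=
  match p.2[k]? with
  | some t => pvColUpdA p.1 d t
  | none => d

-- column k of an enumerated log list, as (index, token) pairs
def pvColQ (k : Nat) (l : List (Int × List String)) : List (Int × String) :=
  l.filterMap (fun p => (p.2[k]?).map (fun t => (p.1, t)))

-- the grouped form both programs produce for one column
def pvGrp (qs : List (Int × String)) : List (String × List Int) :=
  (PySem.List.dedup (qs.map (·.2))).map
    (fun t => (t, (qs.filter (fun q => q.2 == t)).map (·.1)))

theorem pv_inner_get (i : Int) (row : List String) :
    ∀ (s : Nat) (cs : List (PySem.Dict String (List Int))) (k : Nat),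
      ((PySem.List.enumerate row (s : Int)).foldl
        (fun cs q => PySem.List.pySetD cs q.1 (pvColUpdA i (PySem.List.pyGetD cs q.1 PySem.Dict.empty) q.2)) cs)[k]? =
      if s ≤ k then pvG row[k - s]? i cs[k]? else cs[k]? := by
  induction row with
  | nil =>
    intro s cs k
    simp [PySem.List.enumerate_nil, pvG]
  | cons t row ih =>
    intro s cs k
    rw [PySem.List.enumerate_cons]
    simp only [List.foldl_cons]
    have hcast : (s : Int) + 1 = ((s + 1 : Nat) : Int) := by push_cast; ring
    rw [hcast, ih (s + 1)]
    simp only [PySem.List.pySetD_natCast, PySem.List.pyGetD_natCast]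
    rw [List.getElem?_set, List.getD_eq_getElem?_getD]
    by_cases hks : k = s
    · subst hks
      simp only [if_neg (show ¬ k + 1 ≤ k by omega), if_pos (le_refl k),
        Nat.sub_self, List.getElem?_cons_zero]
      rcases h : cs[k]? with _ | d
      · have : cs.length ≤ k := List.getElem?_eq_none_iff.mp h
        simp [pvG, show ¬ k < cs.length by omega]
      · have hlt : k < cs.length := (List.getElem?_eq_some_iff.mp h).1
        simp [pvG, hlt]
    · by_cases hsk : s ≤ k
      · have h1 : s + 1 ≤ k := by omega
        have h2 : k - s = (k - (s + 1)) + 1 := by omega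
        simp only [if_pos h1, if_pos hsk, if_neg (show ¬ s = k from fun h => hks h.symm)]
        rw [h2, List.getElem?_cons_succ]
      · simp only [if_neg (show ¬ s + 1 ≤ k by omega), if_neg hsk,
          if_neg (show ¬ s = k from fun h => hks h.symm)]

theorem pv_outer_get (k : Nat) (tl : List (List String)) :
    ∀ (n : Int) (cs : List (PySem.Dict String (List Int))),
      ((PySem.List.enumerate tl n).foldl
        (fun cs p =>
          (PySem.List.enumerate p.2).foldl
            (fun cs q => PySem.List.pySetD cs q.1 (pvColUpdA p.1 (PySem.List.pyGetD cs q.1 PySem.Dict.empty) q.2)) cs)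
        cs)[k]? =
      (PySem.List.enumerate tl n).foldl (fun od p => pvG p.2[k]? p.1 od) cs[k]? := by
  induction tl with
  | nil => intro n cs; simp [PySem.List.enumerate_nil]
  | cons row tl ih =>
    intro n cs
    rw [PySem.List.enumerate_cons]
    simp only [List.foldl_cons]
    rw [ih]
    have h0 : ((0 : Nat) : Int) = (0 : Int) := rfl
    rw [← h0, pv_inner_get]
    simp

theorem pv_opt_fold (k : Nat) (l : List (Int × List String)) :
    ∀ (d : PySem.Dict String (List Int)),
      l.foldl (fun od p => pvG p.2[k]? p.1 od) (some d) = some (l.foldl (pvColStep k) d) := by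
  induction l with
  | nil => intro d; simp
  | cons p l ih =>
    intro d
    simp only [List.foldl_cons]
    have : pvG p.2[k]? p.1 (some d) = some (pvColStep k d p) := by
      unfold pvG pvColStep
      cases p.2[k]? <;> simp
    rw [this, ih]

theorem pv_opt_fold_none (k : Nat) (l : List (Int × List String)) :
    l.foldl (fun od p => pvG p.2[k]? p.1 od) (none : Option (PySem.Dict String (List Int))) = none := by
  induction l with
  | nil => simp
  | cons p l ih =>
    simp only [List.foldl_cons]
    have : pvG p.2[k]? p.1 none = none := by unfold pvG; cases p.2[k]? <;> simp
    rw [this, ih]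

-- A's insert-then-append update is exactly one dict.modify
theorem pv_updA_modify (i : Int) (d : PySem.Dict String (List Int)) (t : String) :
    pvColUpdA i d t = d.modify t [] (· ++ [i]) := by
  unfold pvColUpdA
  by_cases h : d.contains t
  · simp [h]
  · have h' : d.contains t = false := by simpa using h
    simp only [h', Bool.false_eq_true, if_false, PySem.Dict.modify,
      PySem.Dict.getD_insert_self, PySem.Dict.insert_insert_self,
      PySem.Dict.getD_of_not_contains d ([] : List Int) h']

-- A's per-column fold is the modify-fold over the column's (index, token) pairs
theorem pv_fold_eq_modify (k : Nat) (l : List (Int × List String)) :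
    ∀ (d : PySem.Dict String (List Int)),
      l.foldl (pvColStep k) d =
        (pvColQ k l).foldl (fun d q => d.modify q.2 [] (· ++ [q.1])) d := by
  induction l with
  | nil => intro d; simp [pvColQ]
  | cons p l ih =>
    intro d
    unfold pvColQ
    simp only [List.filterMap_cons, List.foldl_cons]
    rcases h : p.2[k]? with _ | t
    · simp only [Option.map_none]
      rw [show pvColStep k d p = d from by unfold pvColStep; rw [h]]
      exact ih d
    · simp only [Option.map_some, List.foldl_cons]
      rw [show pvColStep k d p = pvColUpdA p.1 d t from by unfold pvColStep; rw [h]]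
      rw [pv_updA_modify]
      exact ih _

-- map/filter through Prod.swap
theorem pv_swap_filter (qs : List (Int × String)) (t : String) :
    ((qs.map Prod.swap).filter (fun p => p.1 == t)).map (fun p => p.2)
      = (qs.filter (fun q => q.2 == t)).map (fun q => q.1) := by
  induction qs with
  | nil => rfl
  | cons q qs ih => by_cases h : q.2 == t <;> simp [h, ih]

-- the modify-fold from the empty dict groups the column: pvGrp
theorem pv_items_fold (qs : List (Int × String)) :
    (qs.foldl (fun d q => d.modify q.2 [] (· ++ [q.1]))
      (PySem.Dict.empty : PySem.Dict String (List Int))).items = pvGrp qs := by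
  have hnd : (qs.foldl (fun d q => d.modify q.2 [] (· ++ [q.1]))
      (PySem.Dict.empty : PySem.Dict String (List Int))).keys.Nodup :=
    PySem.Dict.nodup_keys_foldl_modify_key qs (·.2) [] (fun d q => (· ++ [q.1])) _
      (by simp [PySem.Dict.keys_empty])
  rw [PySem.Dict.items_eq_map_keys _ hnd []]
  rw [PySem.Dict.keys_foldl_modify_key]
  unfold pvGrp
  have hk : PySem.Set.update (PySem.Dict.empty : PySem.Dict String (List Int)).keys (qs.map (·.2))
      = PySem.List.dedup (qs.map (·.2)) := by
    rw [PySem.Dict.keys_empty]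
    simp only [PySem.Set.update, PySem.List.dedup, PySem.Set.ofList, PySem.Set.empty]
  rw [hk]
  apply List.map_congr_left
  intro t _
  have h := PySem.Dict.getD_foldl_modify_append (l := qs.map Prod.swap)
    (d := (PySem.Dict.empty : PySem.Dict String (List Int))) (c := t)
  rw [List.foldl_map] at h
  simp only [Prod.fst_swap, Prod.snd_swap] at h
  rw [h, PySem.Dict.getD_empty, List.nil_append, pv_swap_filter]

-- a fold of inserts over distinct fresh keys lists its entries in order
theorem pv_items_insert_fold_gen (v : String → List Int) :
    ∀ (order : List String) (d : PySem.Dict String (List Int)), order.Nodup →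
      (∀ t ∈ order, d.contains t = false) →
      (order.foldl (fun d t => d.insert t (v t)) d).items
        = d.items ++ order.map (fun t => (t, v t)) := by
  intro order
  induction order with
  | nil => intro d _ _; simp
  | cons t rest ih =>
    intro d hnd hfr
    simp only [List.foldl_cons, List.map_cons]
    rw [ih _ (by exact hnd.of_cons) (by
        intro t' ht'
        rw [PySem.Dict.contains_insert]
        have hne : t' ≠ t := by
          intro he; exact (List.nodup_cons.mp hnd).1 (he ▸ ht')
        simp [hne, hfr t' (List.mem_cons_of_mem _ ht')]),
      PySem.Dict.items_insert_of_not_contains d (v t) (hfr t (List.mem_cons_self ..))]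
    simp

theorem pv_items_insert_fold (order : List String) (v : String → List Int)
    (h : order.Nodup) :
    (order.foldl (fun d t => d.insert t (v t))
      (PySem.Dict.empty : PySem.Dict String (List Int))).items
      = order.map (fun t => (t, v t)) := by
  rw [pv_items_insert_fold_gen v order PySem.Dict.empty h
    (fun t _ => PySem.Dict.contains_empty t)]
  rfl

-- B rewritten as a map over column indices, producing pvGrp of each column
theorem pv_alt_eq_map (tok_logs : List (List String)) :
    groupby_col_alt tok_logs =
      (List.range (tok_logs.headD []).length).map
        (fun k => pvGrp (pvColQ k (PySem.List.enumerate tok_logs))) := by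
  unfold groupby_col_alt
  rw [PySem.List.foldl_append_singleton_eq_map, PySem.List.pyRange_one, List.map_map]
  simp only [List.nil_append]
  apply List.map_congr_left
  intro k _
  simp only [Function.comp_apply, zero_add]
  have hcol : (PySem.List.enumerate tok_logs).filterMap
      (fun p => if (k : Int) < (p.2.length : Int) then some (p.1, PySem.List.pyGetD p.2 (k : Int) "") else none)
      = pvColQ k (PySem.List.enumerate tok_logs) := by
    unfold pvColQ
    apply List.filterMap_congr
    intro p _
    by_cases hk : k < p.2.length
    · have hki : (k : Int) < (p.2.length : Int) := by exact_mod_cast hk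
      rw [if_pos hki, PySem.List.pyGetD_natCast, List.getD_eq_getElem p.2 "" hk,
        List.getElem?_eq_getElem hk, Option.map_some]
    · have hki : ¬ (k : Int) < (p.2.length : Int) := by exact_mod_cast hk
      rw [if_neg hki, List.getElem?_eq_none_iff.mpr (by omega), Option.map_none]
  rw [hcol]
  rw [pv_items_insert_fold _ _ (PySem.List.nodup_dedup
    (xs := (pvColQ k (PySem.List.enumerate tok_logs)).map (·.2)))]
  rfl

-- ===== VERDICT =====
theorem groupby_col_spec : Claim_equal_groupby_col := by
  intro tl _ _
  unfold Spec_groupby_col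
  rw [pv_alt_eq_map]
  unfold groupby_col
  simp only []
  apply List.ext_getElem?
  intro k
  rw [List.getElem?_map, pv_outer_get]
  by_cases hk : k < (tl.headD []).length
  · rw [show ((List.range (tl.headD []).length).map
        (fun _ => (PySem.Dict.empty : PySem.Dict String (List Int))))[k]? = some PySem.Dict.empty from by
      rw [List.getElem?_map, List.getElem?_range hk]; rfl]
    rw [pv_opt_fold]
    rw [List.getElem?_map, List.getElem?_range hk]
    simp only [Option.map_some]
    rw [pv_fold_eq_modify, pv_items_fold]
  · rw [show ((List.range (tl.headD []).length).map
        (fun _ => (PySem.Dict.empty : PySem.Dict String (List Int))))[k]? = none from by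
      rw [List.getElem?_map, List.getElem?_eq_none_iff.mpr (by simpa using hk)]; rfl]
    rw [pv_opt_fold_none]
    rw [List.getElem?_map, List.getElem?_eq_none_iff.mpr (by simpa using hk)]
    rfl
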